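-- pv_equiv track=rewrite | github.com/kjh03160/Project_Euler | 17.py | answer
-- ===== SOURCE A (Python) =====
-- def answer(n):
--     Ones = ['one', 'two', 'three', 'four', 'five', 'six', 'seven', 'eight', 'nine', 'ten']
--     Eles = ['eleven', 'twelve',  'thirteen', 'fourteen', 'fifteen', 'sixteen',
--             'seventeen', 'eighteen', 'nineteen']
--     Tens = ['twenty', 'thirty', 'forty', 'fifty', 'sixty', 'seventy', 'eighty', 'ninety']
--     hund = 'hundred'
--     thou = 'thousand'
--
--
--     result = 0
--     for i in range(1, n + 1):
--         if i <= 10: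
--             result += len(Ones[i - 1])
--
--         elif i < 100:
--             if i < 20:
--                 result += len(Eles[i - 11])
--             else:
--                 string = str(i)
--                 if string[1] == '0':
--                     result += len(Tens[int(string[0]) - 2])
--                 else:
--                     result += len(Tens[(i // 10) - 2]) + len(Ones[int(string[1]) - 1])
--
--         elif i < 1000:
--             first = Ones[(i // 100) - 1] + hund
--             second = ''
--             third = ''
--             val = i % 100
--             if val == 0:
--                 result = result + len(first)
--             else:
--                 if val <= 10:
--                     third = Ones[val - 1]
--                 else:
--                     if val < 20:
--                         second = Eles[val - 11]
--                     else:
--                         string = str(val)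
--                         if string[1] == '0':
--                             second = Tens[int(string[0]) - 2]
--                         else:
--                             second = Tens[val // 10 - 2]
--                             third = Ones[int(string[1]) - 1]
--
--                 result = result + len(first + second + third) + len('and')
--         else:
--             result = result + len(thou) + len(Ones[0])
--     return result
-- ===== SOURCE B (Python) =====
-- ONES_L = [3, 3, 5, 4, 4, 3, 5, 5, 4, 3]      # one..ten
-- TEENS_L = [6, 6, 8, 8, 7, 7, 9, 8, 8]        # eleven..nineteen
-- TENS_L = [6, 6, 5, 5, 5, 7, 6, 6]            # twenty..ninety
--
--
-- def _small(v):
--     # letter count of the spelling of 1 <= v <= 99, by digit arithmetic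
--     if v <= 10:
--         return ONES_L[v - 1]
--     if v < 20:
--         return TEENS_L[v - 11]
--     t, u = divmod(v, 10)
--     return TENS_L[t - 2] + (ONES_L[u - 1] if u else 0)
--
--
-- def _letters(i):
--     # letter count of the spelling of 1 <= i <= 999 (with 'and' after the hundreds)
--     if i < 100:
--         return _small(i)
--     h, v = divmod(i, 100)
--     return ONES_L[h - 1] + 7 + (3 + _small(v) if v else 0)
--
--
-- def answer(n):
--     m = min(n, 999)
--     total = sum(_letters(i) for i in range(1, m + 1))
--     if n > 999:
--         total += 11 * (n - 999)
--     return total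
-- ===== Notes on version B (the rewrite author's own statement) =====
-- stated objective: faster
-- what changed: Replaces A's per-number loop with str()/string-indexing word lookups by integer digit arithmetic over length tables, summing only the sub-thousand prefix and adding the constant per-number contribution of everything larger in closed form.
import Mathlib
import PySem

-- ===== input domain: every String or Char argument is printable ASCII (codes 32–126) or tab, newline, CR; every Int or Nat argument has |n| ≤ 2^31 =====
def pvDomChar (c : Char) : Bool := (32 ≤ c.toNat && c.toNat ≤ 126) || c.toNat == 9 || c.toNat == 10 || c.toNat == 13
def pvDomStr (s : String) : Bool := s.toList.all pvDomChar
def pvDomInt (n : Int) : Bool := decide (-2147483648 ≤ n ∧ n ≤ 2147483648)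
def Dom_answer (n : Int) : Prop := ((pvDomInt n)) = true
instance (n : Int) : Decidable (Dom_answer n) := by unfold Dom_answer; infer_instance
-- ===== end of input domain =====

-- B replaces A's per-number string building (str(i), slicing, word lists) by integer digit
-- arithmetic over length tables, sums only 1..min(n,999), and adds the contribution of the
-- four-digit-and-larger numbers in closed form: O(1) instead of O(n).

-- ===== PORT A =====
def onesA : List String := ["one", "two", "three", "four", "five", "six", "seven", "eight", "nine", "ten"]
def elesA : List String := ["eleven", "twelve", "thirteen", "fourteen", "fifteen", "sixteen",
                            "seventeen", "eighteen", "nineteen"]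
def tensA : List String := ["twenty", "thirty", "forty", "fifty", "sixty", "seventy", "eighty", "ninety"]

-- the (second, third) strings A assigns for 1 ≤ val ≤ 99 in its 100 ≤ i < 1000 branch
-- (Python's second/third variables; '' where A leaves the variable empty)
def secondThirdA (val : Int) : String × String :=
  if val ≤ 10 then
    ("", (PySem.List.pyGet? onesA (val - 1)).getD "")
  else if val < 20 then
    ((PySem.List.pyGet? elesA (val - 11)).getD "", "")
  else
    let string := PySem.Int.toStr val
    if (PySem.Str.pyGet? string 1).getD ' ' = '0' then
      ((PySem.List.pyGet? tensA
        ((PySem.Int.ofStr? (String.ofList [(PySem.Str.pyGet? string 0).getD ' '])).getD 0 - 2)).getD "", "")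
    else
      ((PySem.List.pyGet? tensA (PySem.Int.floordiv val 10 - 2)).getD "",
       (PySem.List.pyGet? onesA
        ((PySem.Int.ofStr? (String.ofList [(PySem.Str.pyGet? string 1).getD ' '])).getD 0 - 1)).getD "")

-- the amount A's loop body adds to `result` for the value i (each Python branch is `result += …`)
def deltaA (i : Int) : Int :=
  if i ≤ 10 then
    PySem.Str.len ((PySem.List.pyGet? onesA (i - 1)).getD "")
  else if i < 100 then
    if i < 20 then
      PySem.Str.len ((PySem.List.pyGet? elesA (i - 11)).getD "")
    else
      let string := PySem.Int.toStr i
      if (PySem.Str.pyGet? string 1).getD ' ' = '0' then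
        PySem.Str.len ((PySem.List.pyGet? tensA
          ((PySem.Int.ofStr? (String.ofList [(PySem.Str.pyGet? string 0).getD ' '])).getD 0 - 2)).getD "")
      else
        PySem.Str.len ((PySem.List.pyGet? tensA (PySem.Int.floordiv i 10 - 2)).getD "") +
        PySem.Str.len ((PySem.List.pyGet? onesA
          ((PySem.Int.ofStr? (String.ofList [(PySem.Str.pyGet? string 1).getD ' '])).getD 0 - 1)).getD "")
  else if i < 1000 then
    let first := ((PySem.List.pyGet? onesA (PySem.Int.floordiv i 100 - 1)).getD "") ++ "hundred"
    let val := PySem.Int.mod i 100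
    if val = 0 then
      PySem.Str.len first
    else
      let st := secondThirdA val
      PySem.Str.len (first ++ st.1 ++ st.2) + PySem.Str.len "and"
  else
    PySem.Str.len "thousand" + PySem.Str.len ((PySem.List.pyGet? onesA 0).getD "")

def answer (n : Int) : Int :=
  (PySem.List.pyRange 1 (n + 1)).foldl (fun result i => result + deltaA i) 0

-- ===== PORT B =====
def onesL : List Int := [3, 3, 5, 4, 4, 3, 5, 5, 4, 3]
def teensL : List Int := [6, 6, 8, 8, 7, 7, 9, 8, 8]
def tensL : List Int := [6, 6, 5, 5, 5, 7, 6, 6]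

-- letter count of 1 ≤ v ≤ 99, by digit arithmetic
def smallB (v : Int) : Int :=
  if v ≤ 10 then (PySem.List.pyGet? onesL (v - 1)).getD 0
  else if v < 20 then (PySem.List.pyGet? teensL (v - 11)).getD 0
  else
    let t := PySem.Int.floordiv v 10
    let u := PySem.Int.mod v 10
    (PySem.List.pyGet? tensL (t - 2)).getD 0 +
      (if u ≠ 0 then (PySem.List.pyGet? onesL (u - 1)).getD 0 else 0)

-- letter count of 1 ≤ i ≤ 999 (with 'and' after the hundreds)
def lettersB (i : Int) : Int :=
  if i < 100 then smallB i
  else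
    let h := PySem.Int.floordiv i 100
    let v := PySem.Int.mod i 100
    (PySem.List.pyGet? onesL (h - 1)).getD 0 + 7 + (if v ≠ 0 then 3 + smallB v else 0)

def answer_alt (n : Int) : Int :=
  let m := min n 999
  let total := (PySem.List.pyRange 1 (m + 1)).foldl (fun t i => t + lettersB i) 0
  if n > 999 then total + 11 * (n - 999) else total

-- ===== PRECONDITION & SPEC =====
def Spec_answer (n : Int) (out : Int) : Prop := out = answer_alt n
instance (n : Int) (out : Int) : Decidable (Spec_answer n out) := by unfold Spec_answer; infer_instance

-- ===== CLAIM (what is proved, stated in full; the proofs are below) =====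
def Claim_equal_answer : Prop := ∀ (n : Int), Dom_answer n → Spec_answer n (answer n)

-- ===== LEMMAS AND PROOFS =====

-- the per-number letter counts agree below 100 (finite check)
set_option maxRecDepth 2048 in
lemma delta_eq_small : ∀ k : Nat, k < 100 → 1 ≤ k → deltaA (k : Int) = smallB (k : Int) := by
  decide

-- A's second/third pair carries exactly smallB's letters (finite check)
set_option maxRecDepth 2048 in
lemma secondThird_len : ∀ k : Nat, k < 100 → 1 ≤ k →
    PySem.Str.len (secondThirdA (k : Int)).1 + PySem.Str.len (secondThirdA (k : Int)).2
      = smallB (k : Int) := by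
  decide

lemma ones_len : ∀ h : Nat, h < 9 →
    PySem.Str.len ((PySem.List.pyGet? onesA (h : Int)).getD "")
      = (PySem.List.pyGet? onesL (h : Int)).getD 0 := by
  decide

lemma delta_eq_letters (i : Int) (h1 : 1 ≤ i) (h2 : i ≤ 999) : deltaA i = lettersB i := by
  by_cases hsm : i < 100
  · have hk : i = ((i.toNat : Nat) : Int) := by omega
    rw [lettersB, if_pos hsm, hk]
    exact delta_eq_small i.toNat (by omega) (by omega)
  · -- 100 ≤ i ≤ 999: hundreds branch, handled symbolically
    have hfd : PySem.Int.floordiv i 100 = i / 100 := PySem.Int.floordiv_eq_ediv_of_pos (by norm_num)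
    have hmd : PySem.Int.mod i 100 = i % 100 := PySem.Int.mod_eq_emod_of_pos (by norm_num)
    have hhc : (i / 100 - 1 : Int) = (((i / 100 - 1).toNat : Nat) : Int) := by omega
    have hones := ones_len (i / 100 - 1).toNat (by omega)
    rw [← hhc] at hones
    simp only [deltaA, lettersB, if_neg (by omega : ¬ i ≤ 10), if_neg hsm,
      if_pos (by omega : i < 1000), hfd, hmd]
    by_cases hv : i % 100 = 0
    · rw [if_pos hv, if_neg (by omega : ¬ i % 100 ≠ 0), PySem.Str.len_append, hones,
        show PySem.Str.len "hundred" = 7 from by decide]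
      ring
    · have hvc : (i % 100 : Int) = (((i % 100).toNat : Nat) : Int) := by omega
      have hst := secondThird_len (i % 100).toNat (by omega) (by omega)
      rw [← hvc] at hst
      rw [if_neg hv, if_pos hv, PySem.Str.len_append, PySem.Str.len_append,
        PySem.Str.len_append, hones, show PySem.Str.len "and" = 3 from by decide,
        show PySem.Str.len "hundred" = 7 from by decide]
      omega

-- beyond three digits A adds a constant, len('thousand') + len('one'), each step
lemma delta_big (i : Int) (h : 1000 ≤ i) : deltaA i = 11 := by
  unfold deltaA
  rw [if_neg (by omega), if_neg (by omega), if_neg (by omega)]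
  decide

lemma answer_eq_alt_small (n : Int) (h : n ≤ 999) : answer n = answer_alt n := by
  unfold answer answer_alt
  have hm : min n 999 = n := min_eq_left h
  simp only [hm, if_neg (by omega : ¬ n > 999)]
  exact PySem.List.foldl_congr_mem _ _ _ _ (by
    intro acc x hx
    rw [PySem.List.mem_pyRange_one] at hx
    rw [delta_eq_letters x hx.1 (by omega)])

lemma answer_succ (n : Int) (h : 0 ≤ n) : answer (n + 1) = answer n + deltaA (n + 1) := by
  unfold answer
  rw [show (n + 1 + 1 : Int) = (n + 1) + 1 from rfl,
      PySem.List.pyRange_one_succ_right (by omega), List.foldl_append]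
  rfl

lemma answer_eq_alt_big (n : Int) (h : 1000 ≤ n) : answer n = answer_alt n := by
  induction n, h using Int.le_induction with
  | base =>
      rw [show (1000 : Int) = 999 + 1 from rfl, answer_succ 999 (by omega),
          answer_eq_alt_small 999 (by omega), delta_big (999 + 1) (by omega)]
      unfold answer_alt
      norm_num
  | succ n hn ih =>
      rw [answer_succ n (by omega), delta_big (n + 1) (by omega), ih]
      unfold answer_alt
      have h1 : min n 999 = 999 := min_eq_right (by omega)
      have h2 : min (n + 1) 999 = 999 := min_eq_right (by omega)
      simp only [h1, h2, if_pos (by omega : n > 999), if_pos (by omega : n + 1 > 999)]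
      ring

-- ===== VERDICT (by name: the statement is the Claim_ definition above) =====
theorem answer_spec : Claim_equal_answer := by
  intro n _
  unfold Spec_answer
  by_cases h : n ≤ 999
  · exact answer_eq_alt_small n h
  · exact answer_eq_alt_big n (by omega)
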